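-- pv_equiv track=rewrite | github.com/SidneyGomes/CG-Project | OpenImage/filtros.py | passa_alta
-- ===== SOURCE A (Python) =====
-- def passa_alta(multiplica_matriz):
--
--     mascara = [[-1, -1, -1], [-1, 8, -1], [-1, -1, -1]]
--
--     soma = 0
--     for k in range(len(mascara)):
--         for l in range(len(mascara)):
--             soma += (multiplica_matriz[k][l] * mascara[k][l])
--
--     if soma > 255:
--         soma = 255
--     elif soma < 0:
--         soma = 0
--
--     return soma
-- ===== SOURCE B (Python) =====
-- def passa_alta(multiplica_matriz):
--     # high-pass mask is 8 at the center, -1 elsewhere: weighted sum = 9*center - total of the 3x3 block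
--     r0, r1, r2 = multiplica_matriz[0], multiplica_matriz[1], multiplica_matriz[2]
--     total = r0[0] + r0[1] + r0[2] + r1[0] + r1[1] + r1[2] + r2[0] + r2[1] + r2[2]
--     soma = 9 * r1[1] - total
--     return max(0, min(255, soma))
-- ===== Notes on version B (the rewrite author's own statement) =====
-- stated objective: simpler
-- what changed: Replaces the elementwise 3x3 mask convolution with the closed-form 9*center - total of the nine cells, and the if/elif clamp with max/min; the mask array and product loops disappear.
import Mathlib
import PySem

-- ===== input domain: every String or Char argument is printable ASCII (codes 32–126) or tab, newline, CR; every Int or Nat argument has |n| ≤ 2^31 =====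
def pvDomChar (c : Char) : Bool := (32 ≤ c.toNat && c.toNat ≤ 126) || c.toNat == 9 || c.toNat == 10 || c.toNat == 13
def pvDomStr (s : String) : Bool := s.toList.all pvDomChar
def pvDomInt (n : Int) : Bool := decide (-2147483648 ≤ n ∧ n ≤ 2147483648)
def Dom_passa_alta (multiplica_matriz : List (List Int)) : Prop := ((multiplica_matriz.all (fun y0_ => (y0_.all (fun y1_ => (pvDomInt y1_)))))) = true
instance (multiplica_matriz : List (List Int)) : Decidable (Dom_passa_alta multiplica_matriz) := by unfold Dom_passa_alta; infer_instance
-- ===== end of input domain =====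

-- ===== PORT A =====
-- B replaces the mask convolution by the closed form 9*center - block total (simpler); same return values.
def passa_alta (multiplica_matriz : List (List Int)) : Int :=
  let mascara : List (List Int) := [[-1, -1, -1], [-1, 8, -1], [-1, -1, -1]]
  let soma : Int :=
    (PySem.List.pyRange 0 3 1).foldl (fun soma k =>
      (PySem.List.pyRange 0 3 1).foldl (fun soma l =>
        soma + ((PySem.List.pyGet? multiplica_matriz k).getD []
                  |> fun row => (PySem.List.pyGet? row l).getD 0)
               * (((PySem.List.pyGet? mascara k).getD []
                  |> fun mrow => (PySem.List.pyGet? mrow l).getD 0))) soma) 0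
  if soma > 255 then 255 else if soma < 0 then 0 else soma

-- ===== PORT B =====
def passa_alta_alt (multiplica_matriz : List (List Int)) : Int :=
  let g (row : List Int) (i : Int) : Int := (PySem.List.pyGet? row i).getD 0
  let r0 := (PySem.List.pyGet? multiplica_matriz 0).getD []
  let r1 := (PySem.List.pyGet? multiplica_matriz 1).getD []
  let r2 := (PySem.List.pyGet? multiplica_matriz 2).getD []
  let total := g r0 0 + g r0 1 + g r0 2 + g r1 0 + g r1 1 + g r1 2 + g r2 0 + g r2 1 + g r2 2
  let soma := 9 * g r1 1 - total
  max 0 (min 255 soma)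

-- ===== PRECONDITION & SPEC =====
-- Pre_ excludes inputs where Python A raises IndexError: fewer than 3 rows, or one of the first 3 rows shorter than 3.
def Pre_passa_alta (multiplica_matriz : List (List Int)) : Prop :=
  3 ≤ multiplica_matriz.length ∧ ∀ r ∈ multiplica_matriz.take 3, 3 ≤ r.length
instance (multiplica_matriz : List (List Int)) : Decidable (Pre_passa_alta multiplica_matriz) := by
  unfold Pre_passa_alta; infer_instance
def pvWitness_passa_alta : List (List Int) := [[1, 2, 3], [4, 5, 6], [7, 8, 9]]
def Spec_passa_alta (multiplica_matriz : List (List Int)) (out : Int) : Prop := out = passa_alta_alt multiplica_matriz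
instance (multiplica_matriz : List (List Int)) (out : Int) : Decidable (Spec_passa_alta multiplica_matriz out) := by unfold Spec_passa_alta; infer_instance

-- ===== CLAIM (what is proved, stated in full; the proofs are below) =====
def Claim_equal_passa_alta : Prop := ∀ (multiplica_matriz : List (List Int)), Dom_passa_alta multiplica_matriz → Pre_passa_alta multiplica_matriz → Spec_passa_alta multiplica_matriz (passa_alta multiplica_matriz)

-- ===== LEMMAS AND PROOFS =====
theorem pyGet3_0 {α : Type} (a b c : α) (t : List α) :
    PySem.List.pyGet? (a::b::c::t) 0 = some a := by
  simp only [PySem.List.pyGet?, PySem.List.pyIdx?]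
  norm_num; rw [if_pos (by omega)]; simp
theorem pyGet3_1 {α : Type} (a b c : α) (t : List α) :
    PySem.List.pyGet? (a::b::c::t) 1 = some b := by
  simp only [PySem.List.pyGet?, PySem.List.pyIdx?]
  norm_num; rw [if_pos (by omega)]; simp
theorem pyGet3_2 {α : Type} (a b c : α) (t : List α) :
    PySem.List.pyGet? (a::b::c::t) 2 = some c := by
  simp only [PySem.List.pyGet?, PySem.List.pyIdx?]
  norm_num; rw [if_pos (by omega)]; simp

-- ===== VERDICT (by name: the statement is the Claim_ definition above) =====
theorem passa_alta_spec : Claim_equal_passa_alta := by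
  intro m _ hpre
  obtain ⟨hlen, hrows⟩ := hpre
  match m, hlen with
  | r0 :: r1 :: r2 :: rest, _ =>
    have h0 : 3 ≤ r0.length := hrows r0 (by simp)
    have h1 : 3 ≤ r1.length := hrows r1 (by simp)
    have h2 : 3 ≤ r2.length := hrows r2 (by simp)
    match r0, h0 with
    | a0 :: a1 :: a2 :: t0, _ =>
      match r1, h1 with
      | b0 :: b1 :: b2 :: t1, _ =>
        match r2, h2 with
        | c0 :: c1 :: c2 :: t2, _ =>
          have hr : PySem.List.pyRange 0 3 1 = [0, 1, 2] := by decide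
          simp only [Spec_passa_alta, passa_alta, passa_alta_alt, hr,
            List.foldl, List.take, List.map, List.sum_cons, List.sum_nil,
            pyGet3_0, pyGet3_1, pyGet3_2, Option.getD_some]
          simp only [max_def, min_def]
          split_ifs <;> omega
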